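-- pv_equiv track=rewrite | github.com/morozsm/icom-lan | docs/plans/discovery-artifacts/build_orphan_report.py | bucket_for
-- ===== SOURCE A (Python) =====
-- BUCKET_RULES = [
--     # (predicate, bucket)
--     (lambda n: n in {"audio_analyzer", "audio_bridge", "audio_bus", "audio_fft_scope"}, "audio"),
--     (lambda n: n.startswith("_audio_") or n == "_audio_codecs", "audio"),
--     (lambda n: n == "usb_audio_resolve", "audio"),
--     (lambda n: n in {"scope", "scope_render"}, "scope"),
--     (lambda n: n == "_scope_runtime", "scope"),
--     (lambda n: n in {"civ", "transport", "protocol", "_civ_rx", "_connection_state",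
--                      "_control_phase", "exceptions", "auth", "discovery"}, "core"),
--     (lambda n: n in {"commander", "command_map", "command_spec"}, "commands"),
--     (lambda n: n in {"capabilities", "env_config"}, "core"),
--     (lambda n: n in {"profiles", "profiles_runtime", "rig_loader"}, "profiles"),
--     (lambda n: n in {"radio", "radio_protocol", "radio_state", "radio_state_snapshot",
--                      "radio_initial_state", "radio_reconnect", "radios", "ic705",
--                      "_state_cache", "_state_queries", "_runtime_protocols",
--                      "_audio_runtime_mixin", "_dual_rx_runtime", "_shared_state_runtime",
--                      "_poller_types", "_queue_pressure", "_bounded_queue", "_bridge_metrics",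
--                      "_bridge_state", "sync", "_audio_recovery", "_audio_transcoder",
--                      "meter_cal", "cw_auto_tuner", "startup_checks", "proxy"}, "runtime"),
--     (lambda n: n == "cli", "cli"),
--     (lambda n: n == "types", "core"),
-- ]
--
-- def bucket_for(name: str, summary: str) -> str:
--     for predicate, bucket in BUCKET_RULES:
--         if predicate(name):
--             return bucket
--     s = summary.lower()
--     if "audio" in s:
--         return "unsure:audio"
--     if "scope" in s:
--         return "unsure:scope"
--     if "command" in s:
--         return "unsure:commands"
--     if "profile" in s or "rig" in s:
--         return "unsure:profiles"
--     if "radio" in s or "state" in s or "runtime" in s: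
--         return "unsure:runtime"
--     return "unsure"
-- ===== SOURCE B (Python) =====
-- # B: one prefix check, then BINARY SEARCH over a sorted exact-name table,
-- # then a single fold that picks the highest-priority summary keyword present
-- # (instead of A's linear predicate-rule scan and if-chain cascade).
--
-- # Sorted by name (ASCII order); names starting with "_audio_" are covered by the
-- # prefix check and therefore not listed.
-- _TABLE = [
--     ("_bounded_queue", "runtime"), ("_bridge_metrics", "runtime"),
--     ("_bridge_state", "runtime"), ("_civ_rx", "core"),
--     ("_connection_state", "core"), ("_control_phase", "core"),
--     ("_dual_rx_runtime", "runtime"), ("_poller_types", "runtime"),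
--     ("_queue_pressure", "runtime"), ("_runtime_protocols", "runtime"),
--     ("_scope_runtime", "scope"), ("_shared_state_runtime", "runtime"),
--     ("_state_cache", "runtime"), ("_state_queries", "runtime"),
--     ("audio_analyzer", "audio"), ("audio_bridge", "audio"),
--     ("audio_bus", "audio"), ("audio_fft_scope", "audio"),
--     ("auth", "core"), ("capabilities", "core"), ("civ", "core"),
--     ("cli", "cli"), ("command_map", "commands"), ("command_spec", "commands"),
--     ("commander", "commands"), ("cw_auto_tuner", "runtime"),
--     ("discovery", "core"), ("env_config", "core"), ("exceptions", "core"),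
--     ("ic705", "runtime"), ("meter_cal", "runtime"), ("profiles", "profiles"),
--     ("profiles_runtime", "profiles"), ("protocol", "core"),
--     ("proxy", "runtime"), ("radio", "runtime"),
--     ("radio_initial_state", "runtime"), ("radio_protocol", "runtime"),
--     ("radio_reconnect", "runtime"), ("radio_state", "runtime"),
--     ("radio_state_snapshot", "runtime"), ("radios", "runtime"),
--     ("rig_loader", "profiles"), ("scope", "scope"), ("scope_render", "scope"),
--     ("startup_checks", "runtime"), ("sync", "runtime"),
--     ("transport", "core"), ("types", "core"), ("usb_audio_resolve", "audio"),
-- ]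
--
-- # (keyword, priority, label); the lowest-priority keyword present wins.
-- _SUMMARY_KEYS = [
--     ("audio", 0, "unsure:audio"),
--     ("scope", 1, "unsure:scope"),
--     ("command", 2, "unsure:commands"),
--     ("profile", 3, "unsure:profiles"),
--     ("rig", 3, "unsure:profiles"),
--     ("radio", 4, "unsure:runtime"),
--     ("state", 4, "unsure:runtime"),
--     ("runtime", 4, "unsure:runtime"),
-- ]
--
-- def bucket_for(name: str, summary: str) -> str:
--     # the prefix rule shadows every exact name beginning with "_audio_"
--     if name.startswith("_audio_"):
--         return "audio"
--     lo, hi = 0, len(_TABLE)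
--     while lo < hi:
--         mid = (lo + hi) // 2
--         key, bucket = _TABLE[mid]
--         if key == name:
--             return bucket
--         if key < name:
--             lo = mid + 1
--         else:
--             hi = mid
--     s = summary.lower()
--     best = None
--     for key, prio, label in _SUMMARY_KEYS:
--         if key in s and (best is None or prio < best[0]):
--             best = (prio, label)
--     return best[1] if best is not None else "unsure"
-- ===== Notes on version B (the rewrite author's own statement) =====
-- stated objective: alternative
-- what changed: A scans an ordered list of predicate lambdas and then an if-chain of substring tests; B does one prefix check, a binary search over a sorted exact-name table, and a single fold picking the highest-priority summary keyword present.
import Mathlib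
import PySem

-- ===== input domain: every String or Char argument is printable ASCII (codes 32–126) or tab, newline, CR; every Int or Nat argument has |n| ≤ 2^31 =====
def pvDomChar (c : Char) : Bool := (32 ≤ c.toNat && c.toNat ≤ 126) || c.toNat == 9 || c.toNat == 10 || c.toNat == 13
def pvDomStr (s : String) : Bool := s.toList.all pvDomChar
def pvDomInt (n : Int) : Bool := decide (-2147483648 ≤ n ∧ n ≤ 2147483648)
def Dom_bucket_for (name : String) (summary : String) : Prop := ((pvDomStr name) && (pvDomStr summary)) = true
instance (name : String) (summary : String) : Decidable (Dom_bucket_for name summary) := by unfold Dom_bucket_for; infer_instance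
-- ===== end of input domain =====

-- B replaces A's linear scan of predicate lambdas by a prefix check plus a binary
-- search over a sorted exact-name table, and A's substring if-chain by one fold
-- picking the highest-priority keyword present (objective: alternative algorithm).

-- ===== PORT A =====
-- BUCKET_RULES: list of (predicate, bucket); 'n in {…}' ported as an or-chain of equalities
def bucketRules : List ((String → Bool) × String) :=
  [ (fun n => n == "audio_analyzer" || n == "audio_bridge" || n == "audio_bus" || n == "audio_fft_scope", "audio"),
    (fun n => PySem.Str.startswith n "_audio_" || n == "_audio_codecs", "audio"),
    (fun n => n == "usb_audio_resolve", "audio"),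
    (fun n => n == "scope" || n == "scope_render", "scope"),
    (fun n => n == "_scope_runtime", "scope"),
    (fun n => n == "civ" || n == "transport" || n == "protocol" || n == "_civ_rx" || n == "_connection_state" ||
              n == "_control_phase" || n == "exceptions" || n == "auth" || n == "discovery", "core"),
    (fun n => n == "commander" || n == "command_map" || n == "command_spec", "commands"),
    (fun n => n == "capabilities" || n == "env_config", "core"),
    (fun n => n == "profiles" || n == "profiles_runtime" || n == "rig_loader", "profiles"),
    (fun n => n == "radio" || n == "radio_protocol" || n == "radio_state" || n == "radio_state_snapshot" ||
              n == "radio_initial_state" || n == "radio_reconnect" || n == "radios" || n == "ic705" ||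
              n == "_state_cache" || n == "_state_queries" || n == "_runtime_protocols" ||
              n == "_audio_runtime_mixin" || n == "_dual_rx_runtime" || n == "_shared_state_runtime" ||
              n == "_poller_types" || n == "_queue_pressure" || n == "_bounded_queue" || n == "_bridge_metrics" ||
              n == "_bridge_state" || n == "sync" || n == "_audio_recovery" || n == "_audio_transcoder" ||
              n == "meter_cal" || n == "cw_auto_tuner" || n == "startup_checks" || n == "proxy", "runtime"),
    (fun n => n == "cli", "cli"),
    (fun n => n == "types", "core") ]

-- the 'for predicate, bucket in BUCKET_RULES: if predicate(name): return bucket' loop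
def bucketLoop : List ((String → Bool) × String) → String → Option String
  | [], _ => none
  | (p, b) :: rest, n => if p n then some b else bucketLoop rest n

def bucket_for (name : String) (summary : String) : String :=
  match bucketLoop bucketRules name with
  | some b => b
  | none =>
    let s := PySem.Str.lower summary
    if PySem.Str.isIn "audio" s then "unsure:audio"
    else if PySem.Str.isIn "scope" s then "unsure:scope"
    else if PySem.Str.isIn "command" s then "unsure:commands"
    else if PySem.Str.isIn "profile" s || PySem.Str.isIn "rig" s then "unsure:profiles"
    else if PySem.Str.isIn "radio" s || PySem.Str.isIn "state" s || PySem.Str.isIn "runtime" s then "unsure:runtime"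
    else "unsure"

-- ===== PORT B =====
-- _TABLE of Source B: sorted by name; names starting with "_audio_" are covered by the prefix check
def sortedTable : List (String × String) :=
  [ ("_bounded_queue", "runtime"),
    ("_bridge_metrics", "runtime"),
    ("_bridge_state", "runtime"),
    ("_civ_rx", "core"),
    ("_connection_state", "core"),
    ("_control_phase", "core"),
    ("_dual_rx_runtime", "runtime"),
    ("_poller_types", "runtime"),
    ("_queue_pressure", "runtime"),
    ("_runtime_protocols", "runtime"),
    ("_scope_runtime", "scope"),
    ("_shared_state_runtime", "runtime"),
    ("_state_cache", "runtime"),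
    ("_state_queries", "runtime"),
    ("audio_analyzer", "audio"),
    ("audio_bridge", "audio"),
    ("audio_bus", "audio"),
    ("audio_fft_scope", "audio"),
    ("auth", "core"),
    ("capabilities", "core"),
    ("civ", "core"),
    ("cli", "cli"),
    ("command_map", "commands"),
    ("command_spec", "commands"),
    ("commander", "commands"),
    ("cw_auto_tuner", "runtime"),
    ("discovery", "core"),
    ("env_config", "core"),
    ("exceptions", "core"),
    ("ic705", "runtime"),
    ("meter_cal", "runtime"),
    ("profiles", "profiles"),
    ("profiles_runtime", "profiles"),
    ("protocol", "core"),
    ("proxy", "runtime"),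
    ("radio", "runtime"),
    ("radio_initial_state", "runtime"),
    ("radio_protocol", "runtime"),
    ("radio_reconnect", "runtime"),
    ("radio_state", "runtime"),
    ("radio_state_snapshot", "runtime"),
    ("radios", "runtime"),
    ("rig_loader", "profiles"),
    ("scope", "scope"),
    ("scope_render", "scope"),
    ("startup_checks", "runtime"),
    ("sync", "runtime"),
    ("transport", "core"),
    ("types", "core"),
    ("usb_audio_resolve", "audio") ]

-- _SUMMARY_KEYS of Source B: (keyword, priority, label)
def summaryKeys : List (String × Nat × String) :=
  [ ("audio", 0, "unsure:audio"),
    ("scope", 1, "unsure:scope"),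
    ("command", 2, "unsure:commands"),
    ("profile", 3, "unsure:profiles"),
    ("rig", 3, "unsure:profiles"),
    ("radio", 4, "unsure:runtime"),
    ("state", 4, "unsure:runtime"),
    ("runtime", 4, "unsure:runtime") ]

-- Source B's 'while lo < hi' binary-search loop; the fuel argument (= table length, passed
-- at the call site) bounds the number of iterations of the halving loop, so the port
-- is exact: the loop never runs more than length(_TABLE) times.
-- Python's '<' on str compares code points lexicographically; ported exactly as
-- strLt on the underlying character lists.
def strLt : List Char → List Char → Bool
  | [], [] => false
  | [], _ :: _ => true
  | _ :: _, [] => false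
  | c :: a, d :: b =>
    if c.toNat < d.toNat then true
    else if d.toNat < c.toNat then false
    else strLt a b

def bsearch : List (String × String) → String → Nat → Nat → Nat → Option String
  | _, _, 0, _, _ => none
  | t, k, fuel + 1, lo, hi =>
    if lo < hi then
      let e := t[(lo + hi) / 2]!
      if e.1 == k then some e.2
      else if strLt e.1.toList k.toList then bsearch t k fuel ((lo + hi) / 2 + 1) hi
      else bsearch t k fuel lo ((lo + hi) / 2)
    else none

def bucket_for_alt (name : String) (summary : String) : String :=
  if PySem.Str.startswith name "_audio_" then "audio"
  else
    match bsearch sortedTable name sortedTable.length 0 sortedTable.length with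
    | some b => b
    | none =>
      let s := PySem.Str.lower summary
      -- the 'for key, prio, label in _SUMMARY_KEYS' fold keeping the best (lowest-priority) match
      match summaryKeys.foldl (fun best e =>
        if PySem.Str.isIn e.1 s then
          match best with
          | none => some e.2
          | some b => if e.2.1 < b.1 then some e.2 else best
        else best) (none : Option (Nat × String)) with
      | some b => b.2
      | none => "unsure"

-- ===== PRECONDITION & SPEC =====
def Spec_bucket_for (name : String) (summary : String) (out : String) : Prop := out = bucket_for_alt name summary
instance (name : String) (summary : String) (out : String) : Decidable (Spec_bucket_for name summary out) := by unfold Spec_bucket_for; infer_instance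

-- ===== CLAIM (what is proved, stated in full; the proofs are below) =====
def Claim_equal_bucket_for : Prop := ∀ (name : String) (summary : String), Dom_bucket_for name summary → Spec_bucket_for name summary (bucket_for name summary)

-- ===== LEMMAS AND PROOFS =====
set_option maxRecDepth 8000
set_option maxHeartbeats 2000000

-- if no key in the interval equals k, the binary search returns none (no sortedness needed)
theorem bsearch_none (t : List (String × String)) (k : String) :
    ∀ (fuel lo hi : Nat), (∀ i : Nat, lo ≤ i → i < hi → (t[i]!).1 ≠ k) →
    bsearch t k fuel lo hi = none := by
  intro fuel
  induction fuel with
  | zero => intro lo hi _; rfl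
  | succ n ih =>
    intro lo hi hne
    by_cases hlt : lo < hi
    · have hk : (t[(lo + hi) / 2]!).1 ≠ k := hne _ (by omega) (by omega)
      have hbeq : ((t[(lo + hi) / 2]!).1 == k) = false := by
        simpa using hk
      simp only [bsearch, if_pos hlt, hbeq, Bool.false_eq_true, if_false]
      split_ifs
      · exact ih _ _ (fun i h1 h2 => hne i (by omega) h2)
      · exact ih _ _ (fun i h1 h2 => hne i (by omega) (by omega))
    · simp [bsearch, hlt]

-- A's summary if-chain equals B's best-priority fold, by case analysis on the 8 substring tests
theorem fallback_eq (s : String) :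
    (if PySem.Str.isIn "audio" s then "unsure:audio"
     else if PySem.Str.isIn "scope" s then "unsure:scope"
     else if PySem.Str.isIn "command" s then "unsure:commands"
     else if PySem.Str.isIn "profile" s || PySem.Str.isIn "rig" s then "unsure:profiles"
     else if PySem.Str.isIn "radio" s || PySem.Str.isIn "state" s || PySem.Str.isIn "runtime" s then "unsure:runtime"
     else "unsure") =
    (match summaryKeys.foldl (fun best e =>
        if PySem.Str.isIn e.1 s then
          match best with
          | none => some e.2
          | some b => if e.2.1 < b.1 then some e.2 else best
        else best) (none : Option (Nat × String)) with
      | some b => b.2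
      | none => "unsure") := by
  by_cases h1 : PySem.Chars.isIn ['a', 'u', 'd', 'i', 'o'] s.toList = true
  · simp [summaryKeys, h1]
  simp only [Bool.not_eq_true] at h1
  by_cases h2 : PySem.Chars.isIn ['s', 'c', 'o', 'p', 'e'] s.toList = true
  · simp [summaryKeys, h1, h2]
  simp only [Bool.not_eq_true] at h2
  by_cases h3 : PySem.Chars.isIn ['c', 'o', 'm', 'm', 'a', 'n', 'd'] s.toList = true
  · simp [summaryKeys, h1, h2, h3]
  simp only [Bool.not_eq_true] at h3
  by_cases h4 : PySem.Chars.isIn ['p', 'r', 'o', 'f', 'i', 'l', 'e'] s.toList = true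
  · simp [summaryKeys, h1, h2, h3, h4]
  simp only [Bool.not_eq_true] at h4
  by_cases h5 : PySem.Chars.isIn ['r', 'i', 'g'] s.toList = true
  · simp [summaryKeys, h1, h2, h3, h4, h5]
  simp only [Bool.not_eq_true] at h5
  by_cases h6 : PySem.Chars.isIn ['r', 'a', 'd', 'i', 'o'] s.toList = true
  · simp [summaryKeys, h1, h2, h3, h4, h5, h6]
  simp only [Bool.not_eq_true] at h6
  by_cases h7 : PySem.Chars.isIn ['s', 't', 'a', 't', 'e'] s.toList = true
  · simp [summaryKeys, h1, h2, h3, h4, h5, h6, h7]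
  simp only [Bool.not_eq_true] at h7
  by_cases h8 : PySem.Chars.isIn ['r', 'u', 'n', 't', 'i', 'm', 'e'] s.toList = true
  · simp [summaryKeys, h1, h2, h3, h4, h5, h6, h7, h8]
  simp only [Bool.not_eq_true] at h8
  simp [summaryKeys, h1, h2, h3, h4, h5, h6, h7, h8]

-- ===== VERDICT (by name: the statement is the Claim_ definition above) =====
theorem bucket_for_spec : Claim_equal_bucket_for := by
  intro name summary _
  unfold Spec_bucket_for bucket_for bucket_for_alt
  by_cases h : PySem.Chars.startswith name.toList ['_', 'a', 'u', 'd', 'i', 'o', '_'] = true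
  · simp [bucketLoop, bucketRules, h]
  · simp only [Bool.not_eq_true] at h
    have ha0 : ¬ (name = "_audio_codecs") := fun e => by rw [e] at h; exact absurd h (by decide)
    have ha1 : ¬ (name = "_audio_runtime_mixin") := fun e => by rw [e] at h; exact absurd h (by decide)
    have ha2 : ¬ (name = "_audio_recovery") := fun e => by rw [e] at h; exact absurd h (by decide)
    have ha3 : ¬ (name = "_audio_transcoder") := fun e => by rw [e] at h; exact absurd h (by decide)
    by_cases h1 : name = "_bounded_queue"
    · subst h1; rfl
    have h1' : ¬ ("_bounded_queue" = name) := fun e => h1 e.symm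
    by_cases h2 : name = "_bridge_metrics"
    · subst h2; rfl
    have h2' : ¬ ("_bridge_metrics" = name) := fun e => h2 e.symm
    by_cases h3 : name = "_bridge_state"
    · subst h3; rfl
    have h3' : ¬ ("_bridge_state" = name) := fun e => h3 e.symm
    by_cases h4 : name = "_civ_rx"
    · subst h4; rfl
    have h4' : ¬ ("_civ_rx" = name) := fun e => h4 e.symm
    by_cases h5 : name = "_connection_state"
    · subst h5; rfl
    have h5' : ¬ ("_connection_state" = name) := fun e => h5 e.symm
    by_cases h6 : name = "_control_phase"
    · subst h6; rfl
    have h6' : ¬ ("_control_phase" = name) := fun e => h6 e.symm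
    by_cases h7 : name = "_dual_rx_runtime"
    · subst h7; rfl
    have h7' : ¬ ("_dual_rx_runtime" = name) := fun e => h7 e.symm
    by_cases h8 : name = "_poller_types"
    · subst h8; rfl
    have h8' : ¬ ("_poller_types" = name) := fun e => h8 e.symm
    by_cases h9 : name = "_queue_pressure"
    · subst h9; rfl
    have h9' : ¬ ("_queue_pressure" = name) := fun e => h9 e.symm
    by_cases h10 : name = "_runtime_protocols"
    · subst h10; rfl
    have h10' : ¬ ("_runtime_protocols" = name) := fun e => h10 e.symm
    by_cases h11 : name = "_scope_runtime"
    · subst h11; rfl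
    have h11' : ¬ ("_scope_runtime" = name) := fun e => h11 e.symm
    by_cases h12 : name = "_shared_state_runtime"
    · subst h12; rfl
    have h12' : ¬ ("_shared_state_runtime" = name) := fun e => h12 e.symm
    by_cases h13 : name = "_state_cache"
    · subst h13; rfl
    have h13' : ¬ ("_state_cache" = name) := fun e => h13 e.symm
    by_cases h14 : name = "_state_queries"
    · subst h14; rfl
    have h14' : ¬ ("_state_queries" = name) := fun e => h14 e.symm
    by_cases h15 : name = "audio_analyzer"
    · subst h15; rfl
    have h15' : ¬ ("audio_analyzer" = name) := fun e => h15 e.symm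
    by_cases h16 : name = "audio_bridge"
    · subst h16; rfl
    have h16' : ¬ ("audio_bridge" = name) := fun e => h16 e.symm
    by_cases h17 : name = "audio_bus"
    · subst h17; rfl
    have h17' : ¬ ("audio_bus" = name) := fun e => h17 e.symm
    by_cases h18 : name = "audio_fft_scope"
    · subst h18; rfl
    have h18' : ¬ ("audio_fft_scope" = name) := fun e => h18 e.symm
    by_cases h19 : name = "auth"
    · subst h19; rfl
    have h19' : ¬ ("auth" = name) := fun e => h19 e.symm
    by_cases h20 : name = "capabilities"
    · subst h20; rfl
    have h20' : ¬ ("capabilities" = name) := fun e => h20 e.symm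
    by_cases h21 : name = "civ"
    · subst h21; rfl
    have h21' : ¬ ("civ" = name) := fun e => h21 e.symm
    by_cases h22 : name = "cli"
    · subst h22; rfl
    have h22' : ¬ ("cli" = name) := fun e => h22 e.symm
    by_cases h23 : name = "command_map"
    · subst h23; rfl
    have h23' : ¬ ("command_map" = name) := fun e => h23 e.symm
    by_cases h24 : name = "command_spec"
    · subst h24; rfl
    have h24' : ¬ ("command_spec" = name) := fun e => h24 e.symm
    by_cases h25 : name = "commander"
    · subst h25; rfl
    have h25' : ¬ ("commander" = name) := fun e => h25 e.symm
    by_cases h26 : name = "cw_auto_tuner"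
    · subst h26; rfl
    have h26' : ¬ ("cw_auto_tuner" = name) := fun e => h26 e.symm
    by_cases h27 : name = "discovery"
    · subst h27; rfl
    have h27' : ¬ ("discovery" = name) := fun e => h27 e.symm
    by_cases h28 : name = "env_config"
    · subst h28; rfl
    have h28' : ¬ ("env_config" = name) := fun e => h28 e.symm
    by_cases h29 : name = "exceptions"
    · subst h29; rfl
    have h29' : ¬ ("exceptions" = name) := fun e => h29 e.symm
    by_cases h30 : name = "ic705"
    · subst h30; rfl
    have h30' : ¬ ("ic705" = name) := fun e => h30 e.symm
    by_cases h31 : name = "meter_cal"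
    · subst h31; rfl
    have h31' : ¬ ("meter_cal" = name) := fun e => h31 e.symm
    by_cases h32 : name = "profiles"
    · subst h32; rfl
    have h32' : ¬ ("profiles" = name) := fun e => h32 e.symm
    by_cases h33 : name = "profiles_runtime"
    · subst h33; rfl
    have h33' : ¬ ("profiles_runtime" = name) := fun e => h33 e.symm
    by_cases h34 : name = "protocol"
    · subst h34; rfl
    have h34' : ¬ ("protocol" = name) := fun e => h34 e.symm
    by_cases h35 : name = "proxy"
    · subst h35; rfl
    have h35' : ¬ ("proxy" = name) := fun e => h35 e.symm
    by_cases h36 : name = "radio"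
    · subst h36; rfl
    have h36' : ¬ ("radio" = name) := fun e => h36 e.symm
    by_cases h37 : name = "radio_initial_state"
    · subst h37; rfl
    have h37' : ¬ ("radio_initial_state" = name) := fun e => h37 e.symm
    by_cases h38 : name = "radio_protocol"
    · subst h38; rfl
    have h38' : ¬ ("radio_protocol" = name) := fun e => h38 e.symm
    by_cases h39 : name = "radio_reconnect"
    · subst h39; rfl
    have h39' : ¬ ("radio_reconnect" = name) := fun e => h39 e.symm
    by_cases h40 : name = "radio_state"
    · subst h40; rfl
    have h40' : ¬ ("radio_state" = name) := fun e => h40 e.symm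
    by_cases h41 : name = "radio_state_snapshot"
    · subst h41; rfl
    have h41' : ¬ ("radio_state_snapshot" = name) := fun e => h41 e.symm
    by_cases h42 : name = "radios"
    · subst h42; rfl
    have h42' : ¬ ("radios" = name) := fun e => h42 e.symm
    by_cases h43 : name = "rig_loader"
    · subst h43; rfl
    have h43' : ¬ ("rig_loader" = name) := fun e => h43 e.symm
    by_cases h44 : name = "scope"
    · subst h44; rfl
    have h44' : ¬ ("scope" = name) := fun e => h44 e.symm
    by_cases h45 : name = "scope_render"
    · subst h45; rfl
    have h45' : ¬ ("scope_render" = name) := fun e => h45 e.symm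
    by_cases h46 : name = "startup_checks"
    · subst h46; rfl
    have h46' : ¬ ("startup_checks" = name) := fun e => h46 e.symm
    by_cases h47 : name = "sync"
    · subst h47; rfl
    have h47' : ¬ ("sync" = name) := fun e => h47 e.symm
    by_cases h48 : name = "transport"
    · subst h48; rfl
    have h48' : ¬ ("transport" = name) := fun e => h48 e.symm
    by_cases h49 : name = "types"
    · subst h49; rfl
    have h49' : ¬ ("types" = name) := fun e => h49 e.symm
    by_cases h50 : name = "usb_audio_resolve"
    · subst h50; rfl
    have h50' : ¬ ("usb_audio_resolve" = name) := fun e => h50 e.symm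
    have hnone : bsearch sortedTable name sortedTable.length 0 sortedTable.length = none := by
      apply bsearch_none
      intro i hi1 hi2
      simp only [sortedTable, List.length_cons, List.length_nil] at hi2
      interval_cases i <;> assumption
    simp only [bucketLoop, bucketRules, Bool.or_assoc, hnone]
    simp [h, ha0, ha1, ha2, ha3, h1, h2, h3, h4, h5, h6, h7, h8, h9, h10, h11, h12, h13, h14, h15, h16, h17, h18, h19, h20, h21, h22, h23, h24, h25, h26, h27, h28, h29, h30, h31, h32, h33, h34, h35, h36, h37, h38, h39, h40, h41, h42, h43, h44, h45, h46, h47, h48, h49, h50]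
    simpa [or_assoc] using fallback_eq (PySem.Str.lower summary)
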